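-- pv_equiv track=rewrite | github.com/haohoangofficial/minerva-technical-test | Section II.py | is_beautiful_string
-- ===== SOURCE A (Python) =====
-- def is_beautiful_string(string):
--     # Chuyển kí tự sang lowercase
--     string = string.lower()
--     # Kiểm tra độ dài của chuỗi kí tự
--     if len(string) < 3 or len(string) > 50:
--         return False
--     # Kiểm tra kí tự có thuộc a-z hay không
--     for c in string:
--         if ord(c) < 97 or ord(c) > 122:
--             return False
--     # khởi tạo dictionary chứa tần số của từng kí tự
--     f = {}
--     for i in string:
--         if i in f:
--            f[i] += 1
--         else:
--             f[i] = 1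
--     # Lọc dữ liệu theo thứ tự anphabet
--     d = dict(sorted(f.items()))
--     # Khởi tạo biến previous bằng giá trị giới hạn max len(string)
--     previous = 50
--     for j in d.items():
--         if j[1] > previous:
--             return False
--         else:
--             previous = j[1]
--     return True
-- ===== SOURCE B (Python) =====
-- def is_beautiful_string(string):
--     s = string.lower()
--     if not (3 <= len(s) <= 50):
--         return False
--     t = sorted(s)
--     if t[0] < 'a' or t[-1] > 'z':
--         return False
--     # run-length scan of the sorted string: runs are the letter frequencies
--     # in alphabetical order, so they must be non-increasing
--     prev_run = len(t) + 1
--     run = 1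
--     for u, v in zip(t, t[1:]):
--         if v == u:
--             run += 1
--         else:
--             if run > prev_run:
--                 return False
--             prev_run, run = run, 1
--     return run <= prev_run
-- ===== Notes on version B (the rewrite author's own statement) =====
-- stated objective: alternative
-- what changed: Instead of building a character-frequency dict and sorting its items, B sorts the lowercased string itself, validates the range via the first and last sorted characters (min/max), and checks beauty by a run-length scan of the sorted string: the run lengths are the frequencies in alphabetical order and must be non-increasing.
import Mathlib
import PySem

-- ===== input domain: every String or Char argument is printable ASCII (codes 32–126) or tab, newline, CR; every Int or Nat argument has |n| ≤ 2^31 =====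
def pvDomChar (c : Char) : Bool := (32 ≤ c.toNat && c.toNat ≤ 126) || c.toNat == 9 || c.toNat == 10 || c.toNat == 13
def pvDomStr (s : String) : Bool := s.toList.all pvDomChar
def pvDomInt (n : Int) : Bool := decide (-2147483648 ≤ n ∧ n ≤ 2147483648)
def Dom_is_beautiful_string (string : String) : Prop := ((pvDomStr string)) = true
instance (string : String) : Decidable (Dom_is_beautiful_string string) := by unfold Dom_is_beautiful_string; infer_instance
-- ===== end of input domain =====

-- B replaces A's frequency dict + sorted(items) by sorting the lowercased string itself and
-- run-length-scanning it (the runs are the frequencies in alphabetical order): an alternative algorithm.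

-- ===== PORT A =====
def is_beautiful_string (string : String) : Bool :=
  let s := PySem.Chars.lower string.toList
  if s.length < 3 || s.length > 50 then false
  else if s.any (fun c => decide (c.toNat < 97) || decide (122 < c.toNat)) then false
  else
    -- f[i] += 1 reads the existing entry, which is exactly d.getD i 0 in the contains branch
    let f : PySem.Dict Char Int :=
      s.foldl (fun d i => if d.contains i then d.insert i (d.getD i 0 + 1) else d.insert i 1)
        PySem.Dict.empty
    -- sorted(f.items()): lexicographic tuple sort = sorted2 with keys fst, snd
    let d := PySem.List.sorted2 f.items Prod.fst Prod.snd
    -- the early-return loop over d.items with `previous`, as an Option fold (none = returned False)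
    (d.foldl (fun st j =>
        match st with
        | none => none
        | some previous => if previous < j.2 then none else some j.2)
      (some (50 : Int))).isSome

-- ===== PORT B =====
def is_beautiful_string_alt (string : String) : Bool :=
  let s := PySem.Chars.lower string.toList
  if !(decide (3 ≤ s.length) && decide (s.length ≤ 50)) then false
  else
    let t := PySem.List.sorted s (fun x => x) false
    -- t[0] and t[-1]; none = IndexError, unreachable here since len(t) = len(s) ≥ 3
    match PySem.List.pyGet? t 0, PySem.List.pyGet? t (-1) with
    | some c0, some cl =>
      if decide (c0 < 'a') || decide ('z' < cl) then false
      else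
        -- for u, v in zip(t, t[1:]) with (prev_run, run) state; none = returned False
        match (t.zip (PySem.List.slice t (some 1) none)).foldl
            (fun st p =>
              match st with
              | none => none
              | some pr =>
                if p.2 == p.1 then some (pr.1, pr.2 + 1)
                else if pr.1 < pr.2 then none else some (pr.2, 1))
            ((some ((t.length : Int) + 1, 1)) : Option (Int × Int)) with
        | none => false
        | some pr => decide (pr.2 ≤ pr.1)
    | _, _ => false

-- ===== PRECONDITION & SPEC =====
def Spec_is_beautiful_string (string : String) (out : Bool) : Prop := out = is_beautiful_string_alt string
instance (string : String) (out : Bool) : Decidable (Spec_is_beautiful_string string out) := by unfold Spec_is_beautiful_string; infer_instance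

-- ===== CLAIM (what is proved, stated in full; the proofs are below) =====
def Claim_equal_is_beautiful_string : Prop := ∀ (string : String), Dom_is_beautiful_string string → Spec_is_beautiful_string string (is_beautiful_string string)

-- ===== LEMMAS AND PROOFS =====

def pvAlphabet : List Char :=
  ['a','b','c','d','e','f','g','h','i','j','k','l','m','n','o','p','q','r','s','t','u','v','w','x','y','z']

-- the common non-increasing checker both loops reduce to
def pvChk : Int → List Int → Bool
  | _, [] => true
  | p, n :: ns => if p < n then false else pvChk n ns

theorem pvChk_congr (p q : Int) :
    ∀ (ns : List Int), (∀ n, ns.head? = some n → n ≤ p ∧ n ≤ q) → pvChk p ns = pvChk q ns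
  | [], _ => rfl
  | n :: ns, h => by
    have := h n rfl
    simp [pvChk, not_lt.mpr this.1, not_lt.mpr this.2]

-- ---------- A-side lemmas ----------

theorem pvFoldlA_none :
    ∀ (l : List Int),
      l.foldl (fun st j =>
        match st with
        | none => none
        | some previous => if previous < j then none else some j) none = none
  | [] => rfl
  | _ :: t => pvFoldlA_none t

-- A's previous-loop is pvChk
theorem pvFoldlA_chk :
    ∀ (l : List Int) (p : Int),
      (l.foldl (fun st j =>
          match st with
          | none => none
          | some previous => if previous < j then none else some j) (some p)).isSome
        = pvChk p l
  | [], _ => rfl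
  | n :: l, p => by
    by_cases h : p < n
    · simp [List.foldl_cons, h, pvFoldlA_none, pvChk]
    · simp [List.foldl_cons, h, pvFoldlA_chk l n, pvChk]

-- equation lemma for PySem.List.insertBy
theorem pvInsertBy_cons {α : Type} (f : α → α → Bool) (x y : α) (ys : List α) :
    PySem.List.insertBy f x (y :: ys) =
      if f x y then x :: y :: ys else y :: PySem.List.insertBy f x ys := by
  simp [PySem.List.insertBy]

theorem pvInsertBy_congr {α : Type} (f g : α → α → Bool) (x : α) :
    ∀ (ys : List α), (∀ y ∈ ys, f x y = g x y) →
      PySem.List.insertBy f x ys = PySem.List.insertBy g x ys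
  | [], _ => rfl
  | y :: t, h => by
    rw [pvInsertBy_cons, pvInsertBy_cons, h y (List.mem_cons_self ..),
      pvInsertBy_congr f g x t (fun z hz => h z (List.mem_cons_of_mem _ hz))]

theorem pvFoldl_insertBy_congr {α : Type} (f g : α → α → Bool) (S : List α)
    (h : ∀ a ∈ S, ∀ b ∈ S, f a b = g a b) :
    ∀ (xs acc : List α), (∀ x ∈ xs, x ∈ S) → (∀ x ∈ acc, x ∈ S) →
      xs.foldl (fun acc x => PySem.List.insertBy f x acc) acc
        = xs.foldl (fun acc x => PySem.List.insertBy g x acc) acc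
  | [], _, _, _ => rfl
  | x :: t, acc, hxs, hacc => by
    have hx : x ∈ S := hxs x (List.mem_cons_self ..)
    simp only [List.foldl_cons]
    rw [pvInsertBy_congr f g x acc (fun y hy => h x hx y (hacc y hy))]
    exact pvFoldl_insertBy_congr f g S h t _
      (fun z hz => hxs z (List.mem_cons_of_mem _ hz))
      (fun z hz => by
        rcases (PySem.List.mem_insertBy (before := g) (x := x) (ys := acc) (y := z)).mp hz
          with rfl | hz
        · exact hx
        · exact hacc z hz)

-- sorted2 with keys fst, snd of a pair list whose fst values are pairwise distinct is the
-- unique strictly-fst-increasing rearrangement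
theorem pvSorted2_eq (xs ys : List (Char × Int)) (hperm : ys.Perm xs)
    (hpw : ys.Pairwise (fun a b => a.1 < b.1)) :
    PySem.List.sorted2 xs Prod.fst Prod.snd = ys := by
  have hneYs : ys.Pairwise (fun a b : Char × Int => a.1 ≠ b.1) :=
    hpw.imp (fun h => ne_of_lt h)
  have hne : xs.Pairwise (fun a b : Char × Int => a.1 ≠ b.1) :=
    (hperm.pairwise_iff (by intro a b h; exact h.symm)).mp hneYs
  have hagree : ∀ a ∈ xs, ∀ b ∈ xs,
      (decide (a.1 < b.1) || (!decide (b.1 < a.1) && decide (a.2 < b.2)))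
        = decide (a.1 < b.1) := by
    intro a ha b hb
    by_cases hab : a = b
    · subst hab; simp
    · have hd : a.1 ≠ b.1 := hne.forall (fun _ _ h => Ne.symm h) ha hb hab
      rcases lt_or_gt_of_ne hd with h | h
      · simp [h]
      · simp [h, not_lt_of_gt h]
  have h1 : PySem.List.sorted2 xs Prod.fst Prod.snd
      = xs.foldl (fun acc x => PySem.List.insertBy
          (fun a b : Char × Int =>
            decide (a.1 < b.1) || (!decide (b.1 < a.1) && decide (a.2 < b.2))) x acc) [] := rfl
  rw [h1, pvFoldl_insertBy_congr _ (fun a b : Char × Int => decide (a.1 < b.1)) xs hagree xs []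
    (fun _ hx => hx) (fun _ hx => absurd hx (List.not_mem_nil)),
    ← PySem.List.sorted_eq_foldl_insertBy]
  exact PySem.List.sorted_eq_of_perm_of_pairwise_lt xs ys Prod.fst hperm hpw

-- A's dict-building step is Counter's step
theorem pvStep_eq (d : PySem.Dict Char Int) (i : Char) :
    (if d.contains i then d.insert i (d.getD i 0 + 1) else d.insert i 1)
      = d.modify i 0 (· + 1) := by
  by_cases h : d.contains i = true
  · simp [PySem.Dict.modify, h]
  · have hfind : d.items.find? (fun p => p.1 == i) = none := by
      rw [List.find?_eq_none]
      intro p hp hb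
      simp only [PySem.Dict.contains, List.any_eq_true] at h
      exact h ⟨p, hp, hb⟩
    have hg : d.getD i 0 = 0 := by
      simp [PySem.Dict.getD, PySem.Dict.get?, hfind]
    simp [PySem.Dict.modify, h, hg]

-- a char in 'a'..'z' is a member of the alphabet list
theorem pvMemAlpha (c : Char) (h1 : 97 ≤ c.toNat) (h2 : c.toNat ≤ 122) : c ∈ pvAlphabet := by
  have hv : c = Char.ofNat c.toNat := (Char.ofNat_toNat c).symm
  set n := c.toNat with hn
  interval_cases n <;> (rw [hv]; decide)

theorem pvAlphaNodup : pvAlphabet.Nodup := by decide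
theorem pvAlphaSorted : pvAlphabet.Pairwise (· < ·) := by decide

-- character-order bridges
theorem pvLtA (c : Char) : (c < 'a') ↔ c.toNat < 97 := by
  rw [Char.lt_def, UInt32.lt_iff_toNat_lt]; exact Iff.rfl
theorem pvZLt (c : Char) : ('z' < c) ↔ 122 < c.toNat := by
  rw [Char.lt_def, UInt32.lt_iff_toNat_lt]; exact Iff.rfl

-- ---------- B-side lemmas ----------

-- last element of a ≤-sorted list is maximal
theorem pvLe_getLast : ∀ (l : List Char), l.Pairwise (· ≤ ·) → ∀ (x : Char), x ∈ l →
    ∀ (h : l ≠ []), x ≤ l.getLast h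
  | a :: t, hpw, x, hx, _ => by
    match t with
    | [] => simp at hx; simp [hx, List.getLast]
    | b :: t' =>
      rw [List.getLast_cons (by simp)]
      rcases List.mem_cons.mp hx with rfl | hx
      · exact (List.pairwise_cons.mp hpw).1 _ (List.getLast_mem _)
      · exact pvLe_getLast (b :: t') hpw.of_cons x hx (by simp)

-- the sorted string as a concatenation of per-letter blocks
def pvBlocks (s : List Char) (K : List Char) : List Char :=
  K.flatMap (fun c => List.replicate (s.count c) c)

theorem pvCount_blocks (s : List Char) (c : Char) :
    ∀ (K : List Char), K.Nodup →
      (pvBlocks s K).count c = if c ∈ K then s.count c else 0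
  | [], _ => by simp [pvBlocks]
  | d :: K, h => by
    simp only [pvBlocks, List.flatMap_cons, List.count_append, List.count_replicate]
    rw [show (K.flatMap (fun c => List.replicate (s.count c) c)) = pvBlocks s K from rfl,
      pvCount_blocks s c K (List.nodup_cons.mp h).2]
    by_cases hc : c = d
    · subst hc
      have hnm : c ∉ K := (List.nodup_cons.mp h).1
      simp [hnm]
    · have hbe : (c == d) = false := by simp [hc]
      simp only [List.mem_cons]
      by_cases hcK : c ∈ K
      · simp [hcK, hc]
        exact fun h' => absurd h'.symm hc
      · simp [hcK, hc]
        exact fun h' => absurd h'.symm hc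

theorem pvBlocks_pairwise (s : List Char) :
    ∀ (K : List Char), K.Pairwise (· < ·) → (pvBlocks s K).Pairwise (· ≤ ·)
  | [], _ => by simp [pvBlocks]
  | d :: K, h => by
    rw [pvBlocks, List.flatMap_cons, List.pairwise_append]
    refine ⟨List.pairwise_replicate.mpr (Or.inr le_rfl),
      pvBlocks_pairwise s K h.of_cons, ?_⟩
    intro x hx y hy
    rw [List.eq_of_mem_replicate hx]
    have hy' : y ∈ K := by
      simp only [List.mem_flatMap] at hy
      obtain ⟨e, he, hy⟩ := hy
      rw [List.eq_of_mem_replicate hy]; exact he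
    exact le_of_lt ((List.pairwise_cons.mp h).1 y hy')

-- with all chars of s in a–z, sorted(s) is the concatenation of the alphabet frequency blocks
theorem pvSorted_eq_blocks (s : List Char)
    (hrange : ∀ c ∈ s, 97 ≤ c.toNat ∧ c.toNat ≤ 122) :
    PySem.List.sorted s (fun x => x) false
      = pvBlocks s (pvAlphabet.filter (fun ch => decide (0 < (s.count ch : Int)))) := by
  set K := pvAlphabet.filter (fun ch => decide (0 < (s.count ch : Int))) with hK
  have hKnd : K.Nodup := pvAlphaNodup.filter _
  have hperm : (pvBlocks s K).Perm s := by
    rw [List.perm_iff_count]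
    intro c
    rw [pvCount_blocks s c K hKnd]
    by_cases hc : c ∈ K
    · simp [hc]
    · rw [if_neg hc]
      by_cases hs : c ∈ s
      · exfalso
        apply hc
        rw [hK, List.mem_filter]
        have h1 := (hrange c hs).1
        have h2 := (hrange c hs).2
        have : 0 < s.count c := List.count_pos_iff.mpr hs
        exact ⟨pvMemAlpha c h1 h2, by simp; omega⟩
      · simp [List.count_eq_zero_of_not_mem hs]
  exact PySem.List.sorted_id_eq_of_perm_of_pairwise (xs := s) (ys := pvBlocks s K) hperm
    (pvBlocks_pairwise s K (pvAlphaSorted.filter _))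

-- zip-with-tail of a nonempty block followed by the rest
theorem pvZipBlock (c : Char) :
    ∀ (n : Nat) (rest : List Char),
      ((List.replicate (n+1) c ++ rest).zip (List.replicate (n+1) c ++ rest).tail)
        = List.replicate n (c, c) ++
            (match rest.head? with
             | none => []
             | some d => (c, d) :: rest.zip rest.tail)
  | 0, rest => by cases rest <;> rfl
  | n+1, rest => by
    have ih := pvZipBlock c n rest
    have h2 : List.replicate (n+1) c ++ rest = c :: (List.replicate n c ++ rest) := by
      simp [List.replicate_succ]
    have h1 : List.replicate (n+1+1) c ++ rest = c :: (List.replicate (n+1) c ++ rest) := by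
      simp [List.replicate_succ]
    rw [h1, List.tail_cons]
    conv_lhs => rw [h2, List.zip_cons_cons]
    have h3 : (c :: (List.replicate n c ++ rest)).zip (List.replicate n c ++ rest)
        = (List.replicate (n+1) c ++ rest).zip (List.replicate (n+1) c ++ rest).tail := by
      rw [h2, List.tail_cons]
    rw [h3, ih]
    simp [List.replicate_succ]

-- B's loop body and finaliser, named for the proofs (definitionally the port's lambdas)
def pvStepB : Option (Int × Int) → Char × Char → Option (Int × Int) :=
  fun st p =>
    match st with
    | none => none
    | some pr =>
      if p.2 == p.1 then some (pr.1, pr.2 + 1)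
      else if pr.1 < pr.2 then none else some (pr.2, 1)

def pvFinB : Option (Int × Int) → Bool
  | none => false
  | some pr => decide (pr.2 ≤ pr.1)

theorem pvFoldlB_none : ∀ (l : List (Char × Char)), l.foldl pvStepB none = none
  | [] => rfl
  | _ :: t => pvFoldlB_none t

theorem pvFoldlB_replicate (c : Char) :
    ∀ (m : Nat) (p r : Int), (List.replicate m (c, c)).foldl pvStepB (some (p, r)) = some (p, r + m)
  | 0, p, r => by simp
  | m+1, p, r => by
    simp only [List.replicate_succ, List.foldl_cons, pvStepB, BEq.rfl, if_pos]
    rw [pvFoldlB_replicate c m p (r+1)]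
    congr 2
    push_cast
    ring

theorem pvBlocks_head (s : List Char) (d : Char) (K : List Char) (h : 1 ≤ s.count d) :
    (pvBlocks s (d :: K)).head? = some d := by
  obtain ⟨m, hm⟩ : ∃ m, s.count d = m + 1 := ⟨s.count d - 1, by omega⟩
  simp [pvBlocks, hm, List.replicate_succ]

-- B's run-length loop over the blocks is pvChk on the counts
theorem pvRunB (s : List Char) :
    ∀ (K : List Char) (p : Int), K ≠ [] → (∀ c ∈ K, 1 ≤ s.count c) →
      K.Pairwise (fun a b => a ≠ b) →
      pvFinB (((pvBlocks s K).zip (pvBlocks s K).tail).foldl pvStepB (some (p, 1)))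
        = pvChk p (K.map (fun c => (s.count c : Int)))
  | [], _, hne, _, _ => absurd rfl hne
  | c :: K, p, _, hpos, hpw => by
    have hn : 1 ≤ s.count c := hpos c (List.mem_cons_self ..)
    obtain ⟨m, hm⟩ : ∃ m, s.count c = m + 1 := ⟨s.count c - 1, by omega⟩
    have hbl : pvBlocks s (c :: K) = List.replicate (m+1) c ++ pvBlocks s K := by
      simp [pvBlocks, hm]
    rw [hbl, pvZipBlock]
    match K, hpw with
    | [], _ =>
      have hb : pvBlocks s ([] : List Char) = [] := by simp [pvBlocks]
      rw [hb]
      simp only [List.head?_nil, List.append_nil, pvFoldlB_replicate]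
      simp only [List.map_cons, List.map_nil, pvChk, hm, pvFinB]
      by_cases hp : p < ((m+1 : Nat) : Int)
      · simp only [if_pos hp]
        have : ¬ ((1 : Int) + m ≤ p) := by push_cast at hp ⊢; omega
        simp [this]
      · simp only [if_neg hp]
        have : (1 : Int) + m ≤ p := by push_cast at hp ⊢; omega
        simp [this]
    | d :: K', hpw =>
      have hd : 1 ≤ s.count d := hpos d (List.mem_cons_of_mem _ (List.mem_cons_self ..))
      rw [pvBlocks_head s d K' hd]
      simp only [List.foldl_append, pvFoldlB_replicate]
      have hdc : (d == c) = false := by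
        have : c ≠ d := (List.pairwise_cons.mp hpw).1 d (List.mem_cons_self ..)
        simp [Ne.symm this]
      simp only [List.foldl_cons, pvStepB, hdc, Bool.false_eq_true, if_false]
      by_cases hp : p < (1 : Int) + m
      · rw [if_pos hp, pvFoldlB_none]
        have : p < ((s.count c : Nat) : Int) := by rw [hm]; push_cast at hp ⊢; omega
        simp [pvChk, pvFinB, this]
      · rw [if_neg hp]
        have ih := pvRunB s (d :: K') ((1:Int) + m) (by simp)
          (fun e he => hpos e (List.mem_cons_of_mem _ he)) hpw.of_cons
        rw [ih]
        have hc : ((s.count c : Nat) : Int) = (1:Int) + m := by rw [hm]; push_cast; ring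
        simp only [List.map_cons, pvChk, hc]
        rw [if_neg hp]

-- ===== VERDICT (by name: the statement is the Claim_ definition above) =====
theorem pvLe_getLast? (l : List Char) (hpw : l.Pairwise (· ≤ ·)) (x : Char) (hx : x ∈ l)
    (z : Char) (hz : l.getLast? = some z) : x ≤ z := by
  have hne : l ≠ [] := by rintro rfl; simp at hz
  rw [List.getLast?_eq_some_getLast hne, Option.some.injEq] at hz
  rw [← hz]
  exact pvLe_getLast l hpw x hx hne

theorem is_beautiful_string_spec : Claim_equal_is_beautiful_string := by
  intro string _
  unfold Spec_is_beautiful_string is_beautiful_string is_beautiful_string_alt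
  generalize PySem.Chars.lower string.toList = s
  by_cases hL : 3 ≤ s.length ∧ s.length ≤ 50
  case neg =>
    have h1 : (decide (s.length < 3) || decide (s.length > 50)) = true := by
      simp only [Bool.or_eq_true, decide_eq_true_eq]; omega
    have h2 : (!(decide (3 ≤ s.length) && decide (s.length ≤ 50))) = true := by
      simp only [Bool.not_eq_true', Bool.and_eq_false_iff, decide_eq_false_iff_not]; omega
    simp [h1, h2]
  case pos =>
    have h1 : (decide (s.length < 3) || decide (s.length > 50)) = false := by
      simp only [Bool.or_eq_false_iff, decide_eq_false_iff_not]; omega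
    have h2 : (!(decide (3 ≤ s.length) && decide (s.length ≤ 50))) = false := by
      simp only [Bool.not_eq_false', Bool.and_eq_true, decide_eq_true_eq]; omega
    simp only [h1, h2, Bool.false_eq_true, if_false]
    set t := PySem.List.sorted s (fun x => x) false with ht
    have hlen : t.length = s.length := PySem.List.length_sorted ..
    have htne : t ≠ [] := by
      intro h
      rw [h] at hlen
      simp at hlen
      omega
    have htpw : t.Pairwise (· ≤ ·) := by
      have := PySem.List.sorted_pairwise (xs := s) (key := fun x => x)
      simpa using this
    obtain ⟨a, t', hcons⟩ := List.exists_cons_of_ne_nil htne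
    obtain ⟨z, hz⟩ : ∃ z, t.getLast? = some z :=
      ⟨t.getLast htne, List.getLast?_eq_some_getLast htne⟩
    have hget0 : PySem.List.pyGet? t 0 = some a := by
      rw [hcons, PySem.List.pyGet?_zero]
      rfl
    have hgetL : PySem.List.pyGet? t (-1) = some z := by
      rw [PySem.List.pyGet?_neg_one]
      exact hz
    rw [hget0, hgetL]
    have has : a ∈ s := by
      have : a ∈ t := by rw [hcons]; exact List.mem_cons_self ..
      rwa [ht, PySem.List.mem_sorted] at this
    have hzs : z ∈ s := by
      have : z ∈ t := List.mem_of_getLast? hz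
      rwa [ht, PySem.List.mem_sorted] at this
    have hscons : PySem.List.sorted s (fun x => x) false = a :: t' := by
      rw [← ht, hcons]
    have hmin : ∀ y ∈ s, a ≤ y := fun y hy =>
      PySem.List.key_head_sorted_le s (fun x => x) hscons y hy
    have hmax : ∀ y ∈ t, y ≤ z := fun y hy => pvLe_getLast? t htpw y hy z hz
    by_cases hAny : (s.any fun c => decide (c.toNat < 97) || decide (122 < c.toNat)) = true
    · -- a bad character exists: A returns False, and B's min/max guard fires
      obtain ⟨c, hcs, hcbad⟩ := List.any_eq_true.mp hAny
      simp only [Bool.or_eq_true, decide_eq_true_eq] at hcbad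
      have hguard : (decide (a < 'a') || decide ('z' < z)) = true := by
        rcases hcbad with hlo | hhi
        · have : a < 'a' := lt_of_le_of_lt (hmin c hcs) ((pvLtA c).mpr hlo)
          simp [this]
        · have hct : c ∈ t := by
            rw [ht, PySem.List.mem_sorted]
            exact hcs
          have : 'z' < z := lt_of_lt_of_le ((pvZLt c).mpr hhi) (hmax c hct)
          simp [this]
      simp [hAny, hguard]
    · -- every character is in a–z: the two cores agree
      have hrange : ∀ c ∈ s, 97 ≤ c.toNat ∧ c.toNat ≤ 122 := by
        intro c hc
        have hb : ¬((decide (c.toNat < 97) || decide (122 < c.toNat)) = true) := by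
          intro hb
          exact hAny (List.any_eq_true.mpr ⟨c, hc, hb⟩)
        simp only [Bool.or_eq_true, decide_eq_true_eq, not_or, not_lt] at hb
        omega
      have hAnyF : (s.any fun c => decide (c.toNat < 97) || decide (122 < c.toNat)) = false := by
        simpa using hAny
      have hguard : (decide (a < 'a') || decide ('z' < z)) = false := by
        have hna : ¬ (a < 'a') := by rw [pvLtA]; have := (hrange a has).1; omega
        have hnz : ¬ ('z' < z) := by rw [pvZLt]; have := (hrange z hzs).2; omega
        simp [hna, hnz]
      simp only [hAnyF, Bool.false_eq_true, if_false, hguard]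
      -- the common index set and counts
      set K := pvAlphabet.filter (fun ch => decide (0 < (s.count ch : Int))) with hK
      set ys : List (Char × Int) := K.map (fun c => (c, (s.count c : Int))) with hys
      -- ===== A side =====
      have hdict : s.foldl (fun d i => if d.contains i then d.insert i (d.getD i 0 + 1)
            else d.insert i 1) (PySem.Dict.empty : PySem.Dict Char Int)
          = PySem.Dict.counter s := by
        rw [PySem.Dict.counter_eq_foldl]
        have hf : (fun (d : PySem.Dict Char Int) i =>
            if d.contains i then d.insert i (d.getD i 0 + 1) else d.insert i 1)
            = (fun d x => d.modify x 0 (· + 1)) := by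
          funext d i
          exact pvStep_eq d i
        rw [hf]
      have hKperm : K.Perm (PySem.Set.ofList s) := by
        refine (List.perm_ext_iff_of_nodup (pvAlphaNodup.filter _)
          (PySem.Set.nodup_ofList s)).mpr ?_
        intro c
        simp only [List.mem_filter, PySem.Set.mem_ofList, decide_eq_true_eq, Int.natCast_pos,
          List.count_pos_iff]
        constructor
        · rintro ⟨-, hc⟩; exact hc
        · intro hc
          exact ⟨pvMemAlpha c (hrange c hc).1 (hrange c hc).2, hc⟩
      have hsorted : PySem.List.sorted2 (PySem.Dict.counter s).items Prod.fst Prod.snd = ys := by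
        rw [PySem.Dict.items_counter]
        refine pvSorted2_eq _ _ (hys ▸ hKperm.map _) ?_
        rw [hys, List.pairwise_map]
        exact ((pvAlphaSorted.filter _).imp (fun h => h))
      rw [hdict, hsorted]
      have hmap : ys.foldl (fun st j =>
          match st with
          | none => none
          | some previous => if previous < j.2 then none else some j.2) (some (50 : Int))
          = (ys.map Prod.snd).foldl (fun st j =>
              match st with
              | none => none
              | some previous => if previous < j then none else some j) (some (50 : Int)) :=
        (List.foldl_map (f := Prod.snd)
          (g := fun st (j : Int) =>
            match st with
            | none => none
            | some previous => if previous < j then none else some j)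
          (l := ys) (init := some (50 : Int))).symm
      rw [hmap, pvFoldlA_chk]
      have hys2 : ys.map Prod.snd = K.map (fun c => (s.count c : Int)) := by
        rw [hys, List.map_map]
        rfl
      rw [hys2]
      -- ===== B side =====
      have hblocks : t = pvBlocks s K := by
        rw [ht, hK]
        exact pvSorted_eq_blocks s hrange
      have hKpos : ∀ c ∈ K, 1 ≤ s.count c := by
        intro c hc
        rw [hK, List.mem_filter] at hc
        have := hc.2
        simp only [decide_eq_true_eq, Int.natCast_pos] at this
        omega
      have hKne : K ≠ [] := by
        have hsne : s ≠ [] := by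
          intro h
          rw [h] at hL
          simp at hL
        obtain ⟨a0, s', hs0⟩ := List.exists_cons_of_ne_nil hsne
        have ha0 : a0 ∈ s := by rw [hs0]; exact List.mem_cons_self ..
        have hmem : a0 ∈ K := by
          rw [hK, List.mem_filter]
          refine ⟨pvMemAlpha a0 (hrange a0 ha0).1 (hrange a0 ha0).2, ?_⟩
          have hpos0 : 0 < s.count a0 := List.count_pos_iff.mpr ha0
          simp only [decide_eq_true_eq, Int.natCast_pos]
          omega
        exact List.ne_nil_of_mem hmem
      have hKpw : K.Pairwise (fun a b => a ≠ b) :=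
        (pvAlphaSorted.filter _).imp (fun h => ne_of_lt h)
      rw [PySem.List.slice_from_one, hblocks]
      show pvChk 50 (K.map (fun c => (s.count c : Int)))
          = pvFinB (((pvBlocks s K).zip (pvBlocks s K).tail).foldl pvStepB
              (some (((pvBlocks s K).length : Int) + 1, 1)))
      rw [pvRunB s K (((pvBlocks s K).length : Int) + 1) hKne hKpos hKpw]
      refine pvChk_congr 50 (((pvBlocks s K).length : Int) + 1) _ ?_
      intro n hn
      have hlen2 : (pvBlocks s K).length = s.length := by
        rw [← hblocks, hlen]
      match K, hn with
      | c :: K', hn =>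
        simp only [List.map_cons, List.head?_cons, Option.some.injEq] at hn
        have hcle : s.count c ≤ s.length := List.count_le_length
        have h50 : s.length ≤ 50 := hL.2
        rw [← hn, hlen2]
        omega
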